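-- pv_equiv track=rewrite | github.com/shchemelevanasya/Loco_GA | Loco_GA_Version7_Version2.py | assignment_to_gene_list
-- ===== SOURCE A (Python) =====
-- from typing import List, Dict, Tuple, Optional, Any
--
-- def assignment_to_gene_list(assignment: Dict[int, List[int]], train_ids: List[int]) -> List[int]:
--     # gene i -> loco_id assigned to train train_ids[i]
--     # find loco for each train (train appears exactly once)
--     gene = [None] * len(train_ids)
--     train_to_index = {tid: idx for idx, tid in enumerate(train_ids)}
--     for loco_id, tlist in assignment.items():
--         for t in tlist:
--             if t in train_to_index:
--                 gene[train_to_index[t]] = loco_id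
--     # if some trains unassigned (None) fill with random loco (shouldn't happen normally)
--     for i in range(len(gene)):
--         if gene[i] is None:
--             # choose any loco present in assignment
--             if assignment:
--                 gene[i] = next(iter(assignment.keys()))
--             else:
--                 gene[i] = 0
--     return gene
-- ===== SOURCE B (Python) =====
-- def assignment_to_gene_list(assignment, train_ids):
--     # drive construction from the train side: one train->loco map, one train->last-index map
--     fallback = next(iter(assignment)) if assignment else 0
--     loco_of = {t: loco for loco, tlist in assignment.items() for t in tlist}
--     train_to_index = {tid: idx for idx, tid in enumerate(train_ids)}
--     gene = [fallback] * len(train_ids)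
--     for tid, idx in train_to_index.items():
--         if tid in loco_of:
--             gene[idx] = loco_of[tid]
--     return gene
-- ===== Notes on version B (the rewrite author's own statement) =====
-- stated objective: alternative
-- what changed: B builds a train-to-loco dict once and then fills the gene from the train/index side (gene pre-initialised with the fallback, one conditional write per distinct train id via train_to_index.items()), instead of A's scan over every assignment entry writing through the index dict followed by a None back-fill pass.
import Mathlib
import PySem

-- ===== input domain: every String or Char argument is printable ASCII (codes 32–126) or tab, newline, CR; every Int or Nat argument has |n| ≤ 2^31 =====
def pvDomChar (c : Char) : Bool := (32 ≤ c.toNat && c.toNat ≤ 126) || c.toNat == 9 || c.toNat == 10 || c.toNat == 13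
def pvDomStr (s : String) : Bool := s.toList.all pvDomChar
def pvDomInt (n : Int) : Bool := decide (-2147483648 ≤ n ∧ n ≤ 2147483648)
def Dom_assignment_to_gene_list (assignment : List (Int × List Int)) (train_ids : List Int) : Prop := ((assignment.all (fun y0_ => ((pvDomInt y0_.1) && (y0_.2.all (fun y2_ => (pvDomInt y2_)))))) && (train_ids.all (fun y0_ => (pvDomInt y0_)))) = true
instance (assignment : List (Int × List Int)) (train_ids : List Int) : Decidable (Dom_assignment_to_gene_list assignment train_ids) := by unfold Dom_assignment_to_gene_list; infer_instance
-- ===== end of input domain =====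

-- B rebuilds the gene from the train side via a train→loco dict (one write per distinct train)
-- instead of A's scan of every assignment entry with writes through the index dict; return
-- values agree on every input (objective: alternative decomposition, same asymptotic cost).

-- ===== PORT A =====
-- gene indices written by A are values of train_to_index, i.e. nonnegative enumerate
-- positions, so `.toNat` on them is exact (Python writes at an in-range nonnegative index).
def assignment_to_gene_list (assignment : List (Int × List Int)) (train_ids : List Int) : List Int :=
  let gene : List (Option Int) := List.replicate train_ids.length (none : Option Int)
  let train_to_index : PySem.Dict Int Int :=
    (PySem.List.enumerate train_ids 0).foldl (fun d p => d.insert p.2 p.1) PySem.Dict.empty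
  let gene := assignment.foldl (fun g p =>
    p.2.foldl (fun g t =>
      match train_to_index.get? t with      -- `if t in train_to_index: gene[train_to_index[t]] = loco_id`
      | some idx => g.set idx.toNat (some p.1)
      | none => g) g) gene
  -- final pass: every still-`None` slot gets the fallback value
  gene.map (fun o =>
    match o with
    | some v => v
    | none => match assignment with          -- `next(iter(assignment.keys()))` if non-empty, else 0
              | [] => 0
              | (k, _) :: _ => k)

-- ===== PORT B =====
def assignment_to_gene_list_alt (assignment : List (Int × List Int)) (train_ids : List Int) : List Int :=
  let fallback : Int := match assignment with  -- `next(iter(assignment)) if assignment else 0`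
    | [] => 0
    | (k, _) :: _ => k
  let loco_of : PySem.Dict Int Int :=          -- {t: loco for loco, tlist in assignment.items() for t in tlist}
    assignment.foldl (fun d p => p.2.foldl (fun d t => d.insert t p.1) d) PySem.Dict.empty
  let train_to_index : PySem.Dict Int Int :=   -- {tid: idx for idx, tid in enumerate(train_ids)}
    (PySem.List.enumerate train_ids 0).foldl (fun d p => d.insert p.2 p.1) PySem.Dict.empty
  let gene : List Int := List.replicate train_ids.length fallback
  train_to_index.items.foldl (fun g p =>       -- for tid, idx in train_to_index.items(): if tid in loco_of: …
    match loco_of.get? p.1 with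
    | some v => g.set p.2.toNat v
    | none => g) gene

-- ===== PRECONDITION & SPEC =====
def Spec_assignment_to_gene_list (assignment : List (Int × List Int)) (train_ids : List Int) (out : List Int) : Prop := out = assignment_to_gene_list_alt assignment train_ids
instance (assignment : List (Int × List Int)) (train_ids : List Int) (out : List Int) : Decidable (Spec_assignment_to_gene_list assignment train_ids out) := by unfold Spec_assignment_to_gene_list; infer_instance

-- ===== CLAIM (what is proved, stated in full; the proofs are below) =====
def Claim_equal_assignment_to_gene_list : Prop := ∀ (assignment : List (Int × List Int)) (train_ids : List Int), Dom_assignment_to_gene_list assignment train_ids → Spec_assignment_to_gene_list assignment train_ids (assignment_to_gene_list assignment train_ids)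

-- ===== LEMMAS AND PROOFS =====

-- the assignment flattened to (train, loco) pairs in A's visiting order
def pvFlat (assignment : List (Int × List Int)) : List (Int × Int) :=
  assignment.flatMap (fun p => p.2.map (fun t => (t, p.1)))

def pvT2I (train_ids : List Int) : PySem.Dict Int Int :=
  (PySem.List.enumerate train_ids 0).foldl (fun d p => d.insert p.2 p.1) PySem.Dict.empty

def pvLoco (assignment : List (Int × List Int)) : PySem.Dict Int Int :=
  assignment.foldl (fun d p => p.2.foldl (fun d t => d.insert t p.1) d) PySem.Dict.empty

-- A's conditional write, as an optional (index, value) update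
def pvFA (d : PySem.Dict Int Int) (q : Int × Int) : Option (Nat × Option Int) :=
  match d.get? q.1 with
  | some idx => some (idx.toNat, some q.2)
  | none => none

-- B's conditional write, as an optional (index, value) update
def pvFB (L : PySem.Dict Int Int) (p : Int × Int) : Option (Nat × Int) :=
  match L.get? p.1 with
  | some v => some (p.2.toNat, v)
  | none => none

-- apply an optional (index, value) update to the gene list
def pvApply {α : Type} (g : List α) (u? : Option (Nat × α)) : List α :=
  match u? with
  | some u => g.set u.1 u.2
  | none => g

-- the value an optional update writes into slot i (if any)
def pvSel {α : Type} (i : Nat) (u? : Option (Nat × α)) : Option α :=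
  match u? with
  | some u => if u.1 = i then some u.2 else none
  | none => none

lemma pv_findSome?_congr {α β : Type} (l : List α) (f g : α → Option β)
    (h : ∀ a ∈ l, f a = g a) : l.findSome? f = l.findSome? g := by
  induction l with
  | nil => rfl
  | cons a l ih =>
    simp only [List.findSome?_cons, h a (List.mem_cons_self)]
    cases g a with
    | some b => rfl
    | none => exact ih fun a ha => h a (List.mem_cons_of_mem _ ha)

lemma pv_findSome?_map {α β γ : Type} (l : List α) (f : α → Option β) (g : β → γ) :
    l.findSome? (fun a => (f a).map g) = (l.findSome? f).map g := by
  induction l with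
  | nil => rfl
  | cons a l ih => cases h : f a <;> simp [h, ih]

lemma pv_findSome?_const_if {α β : Type} (l : List α) (p : α → Prop) [DecidablePred p]
    (h : Option β) :
    l.findSome? (fun a => if p a then h else none) = if ∃ a ∈ l, p a then h else none := by
  induction l with
  | nil => simp
  | cons a l ih =>
    by_cases hpa : p a
    · cases h with
      | none => simp [hpa]
      | some b => simp [hpa]
    · simp [hpa, ih]

lemma pv_get?_foldl_insert {β : Type} (key val : β → Int) (xs : List β)
    (d0 : PySem.Dict Int Int) (t : Int) :
    (xs.foldl (fun d b => d.insert (key b) (val b)) d0).get? t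
      = (xs.reverse.findSome? (fun b => if key b = t then some (val b) else none)).or
          (d0.get? t) := by
  induction xs generalizing d0 with
  | nil => simp
  | cons b xs ih =>
    simp only [List.foldl_cons, List.reverse_cons, List.findSome?_append, Option.or_assoc, ih]
    congr 1
    rw [PySem.Dict.get?_insert]
    by_cases hb : key b = t
    · simp [hb]
    · simp [hb, Ne.symm hb]

lemma pv_getElem?_foldl_set {α β : Type} (f : β → Option (Nat × α)) (l : List β) (g : List α)
    (hlen : ∀ b ∈ l, ∀ u, f b = some u → u.1 < g.length) (i : Nat) :
    (l.foldl (fun g b => pvApply g (f b)) g)[i]?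
      = (l.reverse.findSome? (fun b => pvSel i (f b))).or g[i]? := by
  induction l generalizing g with
  | nil => simp
  | cons b l ih =>
    simp only [List.foldl_cons, List.reverse_cons, List.findSome?_append, Option.or_assoc]
    have htail : ∀ b' ∈ l, ∀ u', f b' = some u' → u'.1 < (pvApply g (f b)).length := by
      intro b' hb' u' hu'
      have hgl : (pvApply g (f b)).length = g.length := by
        unfold pvApply; cases f b <;> simp [List.length_set]
      rw [hgl]
      exact hlen b' (List.mem_cons_of_mem _ hb') u' hu'
    rw [ih (pvApply g (f b)) htail]
    congr 1
    cases hb : f b with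
    | none => simp [pvApply, pvSel, hb]
    | some u =>
      have hu : u.1 < g.length := hlen b List.mem_cons_self u hb
      by_cases hui : u.1 = i
      · subst hui
        simp [pvApply, pvSel, hb, List.getElem?_set_self hu]
      · simp [pvApply, pvSel, hb, hui, List.getElem?_set_ne hui]

-- A's nested write loop over the assignment, flattened to (train, loco) pairs
lemma pv_A_fold (d : PySem.Dict Int Int) (l : List (Int × List Int)) (g : List (Option Int)) :
    l.foldl (fun g p => p.2.foldl (fun g t =>
        match d.get? t with
        | some idx => g.set idx.toNat (some p.1)
        | none => g) g) g
      = (l.flatMap (fun p => p.2.map (fun t => (t, p.1)))).foldl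
          (fun g q => pvApply g (pvFA d q)) g := by
  induction l generalizing g with
  | nil => rfl
  | cons p l ih =>
    simp only [List.foldl_cons, List.flatMap_cons, List.foldl_append, List.foldl_map]
    have hf : (fun (g : List (Option Int)) (t : Int) =>
          match d.get? t with
          | some idx => g.set idx.toNat (some p.1)
          | none => g)
        = fun g t => pvApply g (pvFA d (t, p.1)) := by
      funext g t
      unfold pvApply pvFA
      cases d.get? t <;> rfl
    rw [hf, ih]

-- B's write loop over the items, with the write packaged as an optional update
lemma pv_B_fold (L : PySem.Dict Int Int) (l : List (Int × Int)) (g : List Int) :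
    l.foldl (fun g p => match L.get? p.1 with | some v => g.set p.2.toNat v | none => g) g
      = l.foldl (fun g p => pvApply g (pvFB L p)) g := by
  have hf : (fun (g : List Int) (p : Int × Int) =>
        match L.get? p.1 with
        | some v => g.set p.2.toNat v
        | none => g)
      = fun g p => pvApply g (pvFB L p) := by
    funext g p
    unfold pvApply pvFB
    cases L.get? p.1 <;> rfl
  rw [hf]

-- B's nested build of loco_of, flattened to (train, loco) insertions
lemma pv_loco_flat (assignment : List (Int × List Int)) :
    pvLoco assignment
      = (pvFlat assignment).foldl (fun d q => d.insert q.1 q.2) PySem.Dict.empty := by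
  unfold pvLoco pvFlat
  generalize (PySem.Dict.empty : PySem.Dict Int Int) = d0
  induction assignment generalizing d0 with
  | nil => rfl
  | cons p l ih =>
    simp only [List.foldl_cons, List.flatMap_cons, List.foldl_append, List.foldl_map, ih]

lemma pv_t2i_get? (train_ids : List Int) (t : Int) :
    (pvT2I train_ids).get? t
      = (PySem.List.enumerate train_ids 0).reverse.findSome?
          (fun p => if p.2 = t then some p.1 else none) := by
  have h := pv_get?_foldl_insert (fun p : Int × Int => p.2) (fun p : Int × Int => p.1)
    (PySem.List.enumerate train_ids 0) PySem.Dict.empty t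
  unfold pvT2I
  simpa using h

lemma pv_loco_get? (assignment : List (Int × List Int)) (t : Int) :
    (pvLoco assignment).get? t
      = (pvFlat assignment).reverse.findSome? (fun q => if q.1 = t then some q.2 else none) := by
  have h := pv_get?_foldl_insert (fun q : Int × Int => q.1) (fun q : Int × Int => q.2)
    (pvFlat assignment) PySem.Dict.empty t
  rw [pv_loco_flat]
  simpa using h

-- the train→index dict returns a last index: nonnegative, in range, pointing back at its train
lemma pv_t2i_spec {train_ids : List Int} {t j : Int}
    (h : (pvT2I train_ids).get? t = some j) :
    0 ≤ j ∧ j.toNat < train_ids.length ∧ train_ids[j.toNat]? = some t := by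
  rw [pv_t2i_get?] at h
  obtain ⟨p, hp, hpe⟩ := List.exists_of_findSome?_eq_some h
  rw [List.mem_reverse, PySem.List.mem_enumerate_iff] at hp
  obtain ⟨k, hk, rfl⟩ := hp
  by_cases h2 : train_ids[k] = t
  · simp [h2] at hpe
    obtain rfl : ((k : Int)) = j := hpe
    refine ⟨by positivity, by simpa using hk, ?_⟩
    simp [List.getElem?_eq_getElem hk, h2]
  · simp [h2] at hpe

lemma pv_t2i_val {train_ids : List Int} {i : Nat} (hi : i < train_ids.length) {t : Int}
    (h : (pvT2I train_ids).get? t = some (i : Int)) : t = train_ids[i] := by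
  obtain ⟨-, -, h3⟩ := pv_t2i_spec h
  rw [Int.toNat_natCast] at h3
  rw [List.getElem?_eq_getElem hi] at h3
  exact (Option.some.inj h3).symm

lemma pv_t2i_nodup (train_ids : List Int) : (pvT2I train_ids).keys.Nodup := by
  unfold pvT2I
  exact PySem.Dict.nodup_keys_foldl_insert_key _ (fun p : Int × Int => p.2)
    (fun (_ : PySem.Dict Int Int) (p : Int × Int) => p.1) _
    (by rw [PySem.Dict.keys_empty]; exact List.nodup_nil)

-- the heart of the equivalence: for every gene slot i, A's last effective write and
-- B's single write for that slot select the same loco (or none)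
lemma pv_key (assignment : List (Int × List Int)) (train_ids : List Int) (i : Nat) :
    (pvFlat assignment).reverse.findSome? (fun q => pvSel i (pvFA (pvT2I train_ids) q))
      = ((pvT2I train_ids).items.reverse.findSome?
          (fun p => pvSel i (pvFB (pvLoco assignment) p))).map some := by
  by_cases hP : ∃ t, (pvT2I train_ids).get? t = some (i : Int)
  · obtain ⟨t0, ht0⟩ := hP
    have huniq : ∀ t, (pvT2I train_ids).get? t = some (i : Int) → t = t0 := by
      intro t ht
      obtain ⟨-, hlt, -⟩ := pv_t2i_spec ht0
      rw [Int.toNat_natCast] at hlt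
      rw [pv_t2i_val hlt ht, pv_t2i_val hlt ht0]
    have hA : (pvFlat assignment).reverse.findSome? (fun q => pvSel i (pvFA (pvT2I train_ids) q))
        = ((pvLoco assignment).get? t0).map some := by
      rw [pv_findSome?_congr _ _
          (fun q => ((fun q : Int × Int => if q.1 = t0 then some q.2 else none) q).map some) ?_]
      · rw [pv_findSome?_map, ← pv_loco_get?]
      · intro q _
        cases hq : (pvT2I train_ids).get? q.1 with
        | none =>
          have hqt : ¬ q.1 = t0 := fun he => by rw [he, ht0] at hq; cases hq
          simp [pvSel, pvFA, hq, hqt]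
        | some idx =>
          have h0 : 0 ≤ idx := (pv_t2i_spec hq).1
          by_cases hqt : q.1 = t0
          · have hidx : idx = (i : Int) := by
              have h' := hq
              rw [hqt, ht0] at h'
              exact (Option.some.inj h').symm
            simp [pvSel, pvFA, hqt, ht0, Int.toNat_natCast]
          · have hni : ¬ idx.toNat = i := by
              intro hni
              exact hqt (huniq q.1 (by rw [hq]; congr 1; omega))
            simp [pvSel, pvFA, hq, hqt, hni]
    have hB : (pvT2I train_ids).items.reverse.findSome?
          (fun p => pvSel i (pvFB (pvLoco assignment) p))
        = (pvLoco assignment).get? t0 := by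
      rw [pv_findSome?_congr _ _
          (fun p : Int × Int => if p.1 = t0 then (pvLoco assignment).get? t0 else none) ?_]
      · rw [pv_findSome?_const_if]
        have hex : ∃ p ∈ (pvT2I train_ids).items.reverse, p.1 = t0 :=
          ⟨(t0, (i : Int)), List.mem_reverse.2 (PySem.Dict.mem_items_of_get?_eq_some _ ht0), rfl⟩
        rw [if_pos hex]
      · intro p hp
        have hitem : (pvT2I train_ids).get? p.1 = some p.2 :=
          (PySem.Dict.get?_eq_some_iff_mem_items _ _ _ (pv_t2i_nodup train_ids)).2
            (List.mem_reverse.1 hp)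
        have h0 : 0 ≤ p.2 := (pv_t2i_spec hitem).1
        cases hLp : (pvLoco assignment).get? p.1 with
        | none =>
          by_cases hpt : p.1 = t0
          · have hv : (pvLoco assignment).get? t0 = none := by rw [← hpt]; exact hLp
            simp [pvSel, pvFB, hpt, hv]
          · simp [pvSel, pvFB, hLp, hpt]
        | some v =>
          by_cases hpt : p.1 = t0
          · have hip : (i : Int) = p.2 := by
              have h' := hitem
              rw [hpt, ht0] at h'
              exact Option.some.inj h'
            have h2 : p.2.toNat = i := by omega
            have hv : (pvLoco assignment).get? t0 = some v := by rw [← hpt]; exact hLp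
            simp [pvSel, pvFB, h2, hpt, hv]
          · have hni : ¬ p.2.toNat = i := by
              intro hni
              exact hpt (huniq p.1 (by rw [hitem]; congr 1; omega))
            simp [pvSel, pvFB, hLp, hpt, hni]
    rw [hA, hB]
  · have hA : (pvFlat assignment).reverse.findSome?
        (fun q => pvSel i (pvFA (pvT2I train_ids) q)) = none := by
      rw [List.findSome?_eq_none_iff]
      intro q _
      cases hq : (pvT2I train_ids).get? q.1 with
      | none => simp [pvSel, pvFA, hq]
      | some idx =>
        have h0 : 0 ≤ idx := (pv_t2i_spec hq).1
        have hni : ¬ idx.toNat = i := by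
          intro hni
          exact hP ⟨q.1, by rw [hq]; congr 1; omega⟩
        simp [pvSel, pvFA, hq, hni]
    have hB : (pvT2I train_ids).items.reverse.findSome?
        (fun p => pvSel i (pvFB (pvLoco assignment) p)) = none := by
      rw [List.findSome?_eq_none_iff]
      intro p hp
      have hitem : (pvT2I train_ids).get? p.1 = some p.2 :=
        (PySem.Dict.get?_eq_some_iff_mem_items _ _ _ (pv_t2i_nodup train_ids)).2
          (List.mem_reverse.1 hp)
      have h0 : 0 ≤ p.2 := (pv_t2i_spec hitem).1
      cases hLp : (pvLoco assignment).get? p.1 with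
      | none => simp [pvSel, pvFB, hLp]
      | some v =>
        have hni : ¬ p.2.toNat = i := by
          intro hni
          exact hP ⟨p.1, by rw [hitem]; congr 1; omega⟩
        simp [pvSel, pvFB, hLp, hni]
    rw [hA, hB]
    rfl

theorem pv_main (assignment : List (Int × List Int)) (train_ids : List Int) :
    assignment_to_gene_list assignment train_ids
      = assignment_to_gene_list_alt assignment train_ids := by
  simp only [assignment_to_gene_list, assignment_to_gene_list_alt]
  rw [show ((PySem.List.enumerate train_ids 0).foldl (fun d p => d.insert p.2 p.1)
        PySem.Dict.empty) = pvT2I train_ids from rfl]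
  rw [show (assignment.foldl (fun d p => p.2.foldl (fun d t => d.insert t p.1) d)
        PySem.Dict.empty) = pvLoco assignment from rfl]
  rw [pv_A_fold, pv_B_fold]
  rw [show (assignment.flatMap (fun p => p.2.map (fun t => (t, p.1)))) = pvFlat assignment
        from rfl]
  apply List.ext_getElem?
  intro i
  have hlenA : ∀ q ∈ pvFlat assignment, ∀ u, pvFA (pvT2I train_ids) q = some u →
      u.1 < (List.replicate train_ids.length (none : Option Int)).length := by
    intro q _ u hu
    unfold pvFA at hu
    cases hq : (pvT2I train_ids).get? q.1 with
    | none => rw [hq] at hu; cases hu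
    | some idx =>
      rw [hq] at hu
      obtain rfl : ((idx.toNat, some q.2) : Nat × Option Int) = u := Option.some.inj hu
      simpa [List.length_replicate] using (pv_t2i_spec hq).2.1
  have hlenB : ∀ p ∈ (pvT2I train_ids).items, ∀ u, pvFB (pvLoco assignment) p = some u →
      u.1 < (List.replicate train_ids.length
        (match assignment with | [] => (0 : Int) | (k, _) :: _ => k)).length := by
    intro p hp u hu
    have hitem : (pvT2I train_ids).get? p.1 = some p.2 :=
      (PySem.Dict.get?_eq_some_iff_mem_items _ _ _ (pv_t2i_nodup train_ids)).2 hp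
    unfold pvFB at hu
    cases hLp : (pvLoco assignment).get? p.1 with
    | none => rw [hLp] at hu; cases hu
    | some v =>
      rw [hLp] at hu
      obtain rfl : ((p.2.toNat, v) : Nat × Int) = u := Option.some.inj hu
      simpa [List.length_replicate] using (pv_t2i_spec hitem).2.1
  rw [List.getElem?_map]
  rw [pv_getElem?_foldl_set _ _ _ hlenA i]
  rw [pv_getElem?_foldl_set _ _ _ hlenB i]
  rw [pv_key assignment train_ids i]
  cases hFB : (pvT2I train_ids).items.reverse.findSome?
      (fun p => pvSel i (pvFB (pvLoco assignment) p)) with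
  | none =>
    by_cases hi : i < train_ids.length <;> simp [hi]
  | some v => simp

-- ===== VERDICT (by name: the statement is the Claim_ definition above) =====
theorem assignment_to_gene_list_spec : Claim_equal_assignment_to_gene_list := by
  intro assignment train_ids _
  unfold Spec_assignment_to_gene_list
  exact pv_main assignment train_ids
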